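-- pv_equiv track=rewrite | github.com/akrisfx/EGE | polyakov/16.py | f
-- ===== SOURCE A (Python) =====
-- def f(n):
--     if n == 0:
--         return 0
--     elif n == 1:
--         return 1
--     elif n >= 2 and n & 1 == 0:
--         return f(n//2) + 1
--     elif n >= 2 and n & 1 == 1:
--         return f(n - 1) + n
-- ===== SOURCE B (Python) =====
-- def f(n):
--     # iterative accumulator version of the halving/decrement recursion
--     total = 0
--     while n >= 2:
--         if n & 1 == 0:
--             total += 1
--             n //= 2
--         else:
--             total += n
--             n -= 1
--     if n == 0:
--         return total
--     if n == 1: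
--         return total + 1
--     return None
-- ===== Notes on version B (the rewrite author's own statement) =====
-- stated objective: simpler
-- what changed: Replaced the recursive descent by an iterative while-loop with a running accumulator, returning the base-case value plus the accumulated total after the loop.
-- outside the precondition, e.g. on f(-1): A returns None, B returns None
import Mathlib
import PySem

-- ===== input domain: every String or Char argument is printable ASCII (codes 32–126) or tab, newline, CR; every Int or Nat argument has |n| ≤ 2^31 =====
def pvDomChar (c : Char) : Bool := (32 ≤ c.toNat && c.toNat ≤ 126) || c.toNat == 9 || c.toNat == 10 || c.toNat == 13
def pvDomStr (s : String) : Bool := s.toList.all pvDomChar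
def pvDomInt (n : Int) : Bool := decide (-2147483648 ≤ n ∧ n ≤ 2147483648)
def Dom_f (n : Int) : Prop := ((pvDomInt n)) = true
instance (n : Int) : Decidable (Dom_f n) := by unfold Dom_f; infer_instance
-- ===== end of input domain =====

-- B changes the recursion into an iterative accumulator loop (simpler, constant space); return value only.

-- ===== PORT A =====
-- literal port of A's recursion; for n < 0 Python returns None (excluded by Pre_f), here 0
def f (n : Int) : Int :=
  if n = 0 then 0
  else if n = 1 then 1
  else if n ≥ 2 ∧ PySem.Int.mod n 2 = 0 then f (PySem.Int.floordiv n 2) + 1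
  else if n ≥ 2 ∧ PySem.Int.mod n 2 = 1 then f (n - 1) + n
  else 0
termination_by n.toNat
decreasing_by
  · have h2 : PySem.Int.floordiv n 2 = n / 2 := PySem.Int.floordiv_eq_ediv_of_pos (by omega)
    rw [h2]; omega
  · omega

-- ===== PORT B =====
-- the while-loop of Source B, as a tail-recursive helper carrying (n, total)
def fAltLoop (n total : Int) : Int :=
  if n ≥ 2 then
    if PySem.Int.mod n 2 = 0 then fAltLoop (PySem.Int.floordiv n 2) (total + 1)
    else fAltLoop (n - 1) (total + n)
  else if n = 0 then total
  else if n = 1 then total + 1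
  else 0  -- Python's None branch (excluded by Pre_f)
termination_by n.toNat
decreasing_by
  · have h2 : PySem.Int.floordiv n 2 = n / 2 := PySem.Int.floordiv_eq_ediv_of_pos (by omega)
    rw [h2]; omega
  · omega

def f_alt (n : Int) : Int := fAltLoop n 0

-- ===== PRECONDITION & SPEC =====
-- Pre_f excludes n < 0, where Python's A falls through every branch and returns None (not an int).
def Pre_f (n : Int) : Prop := 0 ≤ n
instance (n : Int) : Decidable (Pre_f n) := by unfold Pre_f; infer_instance
def pvWitness_f : Int := 6
def Spec_f (n : Int) (out : Int) : Prop := out = f_alt n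
instance (n : Int) (out : Int) : Decidable (Spec_f n out) := by unfold Spec_f; infer_instance

-- ===== CLAIM (what is proved, stated in full; the proofs are below) =====
def Claim_equal_f : Prop := ∀ (n : Int), Dom_f n → Pre_f n → Spec_f n (f n)

-- ===== LEMMAS AND PROOFS =====

-- loop invariant: with nonnegative n, the loop result is the pending total plus A's value
theorem fAltLoop_eq (n total : Int) : 0 ≤ n → fAltLoop n total = total + f n := by
  induction n, total using fAltLoop.induct with
  | case1 n total h2 hmod ih =>
      intro _
      have hfd : 0 ≤ PySem.Int.floordiv n 2 := by
        rw [PySem.Int.floordiv_eq_ediv_of_pos (by omega)]; omega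
      rw [fAltLoop, if_pos h2, if_pos hmod, ih hfd]
      conv_rhs => rw [f, if_neg (by omega : ¬ n = 0), if_neg (by omega : ¬ n = 1),
        if_pos (⟨h2, hmod⟩ : n ≥ 2 ∧ PySem.Int.mod n 2 = 0)]
      ring
  | case2 n total h2 hmod ih =>
      intro _
      have hm1 : PySem.Int.mod n 2 = 1 := by
        rw [PySem.Int.mod_eq_emod_of_pos (by omega)] at hmod ⊢
        omega
      rw [fAltLoop, if_pos h2, if_neg hmod, ih (by omega)]
      conv_rhs => rw [f, if_neg (by omega : ¬ n = 0), if_neg (by omega : ¬ n = 1),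
        if_neg (by rintro ⟨-, h0⟩; rw [hm1] at h0; exact absurd h0 one_ne_zero),
        if_pos (⟨h2, hm1⟩ : n ≥ 2 ∧ PySem.Int.mod n 2 = 1)]
      ring
  | case3 total h =>
      intro _
      rw [fAltLoop, f]; norm_num
  | case4 total h h0 =>
      intro _
      rw [fAltLoop, f]; norm_num
  | case5 n total h2 h0 h1 =>
      intro hn
      omega

-- ===== VERDICT (by name: the statement is the Claim_ definition above) =====
theorem f_spec : Claim_equal_f := by
  intro n _ hpre
  unfold Spec_f f_alt
  rw [fAltLoop_eq n 0 hpre, zero_add]
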